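-- pv_equiv track=rewrite | github.com/leeroywking/govdeals_helper | fetch_govdeals_listings.py | csv_fieldnames_for_state
-- ===== SOURCE A (Python) =====
-- from typing import Any
--
-- PREFERRED_COLUMNS = [
--     "assetId",
--     "accountId",
--     "assetShortDescription",
--     "categoryDisplay",
--     "categoryDescription",
--     "assetCategory",
--     "companyName",
--     "locationDisplay",
--     "locationCity",
--     "locationState",
--     "stateDescription",
--     "country",
--     "countryDescription",
--     "assetAuctionStartDate",
--     "assetAuctionStartDateDisplay",
--     "assetAuctionEndDateUtc",
--     "assetAuctionEndDate",
--     "assetAuctionEndDateDisplay",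
--     "timeRemaining",
--     "currentBid",
--     "assetBidPrice",
--     "bidCount",
--     "currencyCode",
--     "makebrand",
--     "model",
--     "modelYear",
--     "auctionTypeId",
--     "lotNumber",
--     "isSoldAuction",
--     "isNewAsset",
--     "itemUrl",
--     "photoUrl",
--     "assetLongDescription",
-- ]
--
-- def csv_fieldnames_for_state(state: dict[str, Any]) -> list[str]:
--     discovered = state.get("assetFieldNames", [])
--     ordered = [col for col in PREFERRED_COLUMNS if col in discovered or col in {"itemUrl", "photoUrl", "locationDisplay", "categoryDisplay"}]
--     ordered.extend(
--         col
--         for col in discovered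
--         if col not in ordered
--     )
--     for derived in ["itemUrl", "photoUrl", "locationDisplay", "categoryDisplay"]:
--         if derived not in ordered:
--             ordered.append(derived)
--     return ordered
-- ===== SOURCE B (Python) =====
-- PREFERRED_COLUMNS = [
--     "assetId",
--     "accountId",
--     "assetShortDescription",
--     "categoryDisplay",
--     "categoryDescription",
--     "assetCategory",
--     "companyName",
--     "locationDisplay",
--     "locationCity",
--     "locationState",
--     "stateDescription",
--     "country",
--     "countryDescription",
--     "assetAuctionStartDate",
--     "assetAuctionStartDateDisplay",
--     "assetAuctionEndDateUtc",
--     "assetAuctionEndDate",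
--     "assetAuctionEndDateDisplay",
--     "timeRemaining",
--     "currentBid",
--     "assetBidPrice",
--     "bidCount",
--     "currencyCode",
--     "makebrand",
--     "model",
--     "modelYear",
--     "auctionTypeId",
--     "lotNumber",
--     "isSoldAuction",
--     "isNewAsset",
--     "itemUrl",
--     "photoUrl",
--     "assetLongDescription",
-- ]
--
--
-- def csv_fieldnames_for_state(state):
--     discovered = state.get("assetFieldNames", [])
--     rank = {c: i for i, c in enumerate(PREFERRED_COLUMNS)}
--     fallback = len(PREFERRED_COLUMNS)
--     candidates = list(dict.fromkeys(
--         list(discovered) + ["itemUrl", "photoUrl", "locationDisplay", "categoryDisplay"]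
--     ))
--     return sorted(candidates, key=lambda c: rank.get(c, fallback))
-- ===== Notes on version B (the rewrite author's own statement) =====
-- stated objective: simpler
-- what changed: Replaces A's preferred-list filter with repeated 'col in discovered' scans, a growing 'col not in ordered' scan and a trailing derived-append loop by a precomputed rank dictionary, an ordered dedup (dict.fromkeys), and one stable sort by rank.
import Mathlib
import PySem

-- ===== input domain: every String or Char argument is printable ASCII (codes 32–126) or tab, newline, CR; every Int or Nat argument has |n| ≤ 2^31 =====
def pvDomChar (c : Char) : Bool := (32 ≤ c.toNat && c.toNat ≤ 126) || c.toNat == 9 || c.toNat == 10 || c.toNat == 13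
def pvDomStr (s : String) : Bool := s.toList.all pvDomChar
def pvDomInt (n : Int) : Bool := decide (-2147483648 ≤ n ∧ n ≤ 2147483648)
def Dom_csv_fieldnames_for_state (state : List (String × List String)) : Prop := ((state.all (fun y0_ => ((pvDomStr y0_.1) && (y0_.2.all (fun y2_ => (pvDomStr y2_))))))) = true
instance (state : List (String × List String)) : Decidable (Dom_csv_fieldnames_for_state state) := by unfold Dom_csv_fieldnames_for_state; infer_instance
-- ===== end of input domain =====

-- B replaces A's repeated list scans (preferred-filter with `col in discovered`, then a growing
-- `col not in ordered` scan) by a rank table + ordered dedup + one stable sort by rank.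

def pvPreferredColumns : List String :=
  ["assetId", "accountId", "assetShortDescription", "categoryDisplay", "categoryDescription",
   "assetCategory", "companyName", "locationDisplay", "locationCity", "locationState",
   "stateDescription", "country", "countryDescription", "assetAuctionStartDate",
   "assetAuctionStartDateDisplay", "assetAuctionEndDateUtc", "assetAuctionEndDate",
   "assetAuctionEndDateDisplay", "timeRemaining", "currentBid", "assetBidPrice", "bidCount",
   "currencyCode", "makebrand", "model", "modelYear", "auctionTypeId", "lotNumber",
   "isSoldAuction", "isNewAsset", "itemUrl", "photoUrl", "assetLongDescription"]

-- ===== PORT A =====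
def csv_fieldnames_for_state (state : List (String × List String)) : List String :=
  let discovered := (PySem.Dict.mk state).getD "assetFieldNames" []
  let ordered := pvPreferredColumns.filter (fun col =>
    discovered.contains col ||
      PySem.Set.contains (PySem.Set.ofList ["itemUrl", "photoUrl", "locationDisplay", "categoryDisplay"]) col)
  let ordered := discovered.foldl (fun acc col => if acc.contains col then acc else acc ++ [col]) ordered
  ["itemUrl", "photoUrl", "locationDisplay", "categoryDisplay"].foldl
    (fun acc derived => if acc.contains derived then acc else acc ++ [derived]) ordered

-- ===== PORT B =====
def csv_fieldnames_for_state_alt (state : List (String × List String)) : List String :=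
  let discovered := (PySem.Dict.mk state).getD "assetFieldNames" []
  let rank : PySem.Dict String Int :=
    (PySem.List.enumerate pvPreferredColumns 0).foldl (fun acc p => acc.insert p.2 p.1) PySem.Dict.empty
  let fallback : Int := (pvPreferredColumns.length : Int)
  let candidates := PySem.List.dedup
    (discovered ++ ["itemUrl", "photoUrl", "locationDisplay", "categoryDisplay"])
  PySem.List.sorted candidates (fun c => rank.getD c fallback) false

-- ===== PRECONDITION & SPEC =====
def Spec_csv_fieldnames_for_state (state : List (String × List String)) (out : List String) : Prop := out = csv_fieldnames_for_state_alt state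
instance (state : List (String × List String)) (out : List String) : Decidable (Spec_csv_fieldnames_for_state state out) := by unfold Spec_csv_fieldnames_for_state; infer_instance

-- ===== CLAIM (what is proved, stated in full; the proofs are below) =====
def Claim_equal_csv_fieldnames_for_state : Prop := ∀ (state : List (String × List String)), Dom_csv_fieldnames_for_state state → Spec_csv_fieldnames_for_state state (csv_fieldnames_for_state state)

-- ===== LEMMAS AND PROOFS =====

-- rank of a column: its index in pvPreferredColumns, or 33 (= length) for non-preferred columns
def krank (c : String) : Int := (pvPreferredColumns.idxOf c : Int)

def bef (a b : String) : Bool := decide (krank a < krank b)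

theorem pvNodup : pvPreferredColumns.Nodup := by decide

theorem krank_lt {c : String} (h : c ∈ pvPreferredColumns) :
    krank c < (pvPreferredColumns.length : Int) := by
  unfold krank; exact_mod_cast List.idxOf_lt_length_of_mem h

theorem krank_not_mem {c : String} (h : c ∉ pvPreferredColumns) :
    krank c = (pvPreferredColumns.length : Int) := by
  unfold krank; rw [List.idxOf_eq_length h]

theorem krank_le (c : String) : krank c ≤ (pvPreferredColumns.length : Int) := by
  unfold krank; exact_mod_cast List.idxOf_le_length

theorem krank_pairwise : pvPreferredColumns.Pairwise (fun a b => krank a < krank b) := by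
  rw [List.pairwise_iff_getElem]
  intro i j hi hj hij
  unfold krank
  rw [List.Nodup.idxOf_getElem pvNodup i hi, List.Nodup.idxOf_getElem pvNodup j hj]
  exact_mod_cast hij

-- the rank dict built by the enumerate-fold looks up to s + index (or the start dict's value)
theorem rank_aux (Q : List String) (hnd : Q.Nodup) :
    ∀ (s : Int) (dd : PySem.Dict String Int) (c : String) (dflt : Int),
      ((PySem.List.enumerate Q s).foldl (fun acc p => acc.insert p.2 p.1) dd).getD c dflt
        = if c ∈ Q then s + (Q.idxOf c : Int) else dd.getD c dflt := by
  induction Q with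
  | nil => intro s dd c dflt; simp [PySem.List.enumerate_nil]
  | cons q Q ih =>
    intro s dd c dflt
    rw [PySem.List.enumerate_cons]
    simp only [List.foldl_cons]
    rw [ih (List.nodup_cons.mp hnd).2 (s + 1) (dd.insert q s) c dflt]
    by_cases hc : c ∈ Q
    · have hqc : q ≠ c := by rintro rfl; exact (List.nodup_cons.mp hnd).1 hc
      rw [if_pos hc, if_pos (List.mem_cons_of_mem _ hc), List.idxOf_cons_ne _ hqc]
      push_cast; ring
    · rw [if_neg hc, PySem.Dict.getD_insert]
      by_cases hqc : c = q
      · subst hqc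
        rw [if_pos rfl, if_pos (List.mem_cons_self ..), List.idxOf_cons_self]
        simp
      · rw [if_neg hqc, if_neg (by simp [List.mem_cons, hqc, hc])]

theorem rank_getD (c : String) :
    ((PySem.List.enumerate pvPreferredColumns 0).foldl (fun acc p => acc.insert p.2 p.1)
        PySem.Dict.empty).getD c (pvPreferredColumns.length : Int) = krank c := by
  rw [rank_aux pvPreferredColumns pvNodup]
  by_cases h : c ∈ pvPreferredColumns
  · rw [if_pos h]; unfold krank; ring
  · rw [if_neg h, PySem.Dict.getD_empty, krank_not_mem h]

theorem insertBy_front (bf : String → String → Bool) (c : String) (l : List String)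
    (h : ∀ y ∈ l, bf c y = true) : PySem.List.insertBy bf c l = c :: l := by
  cases l with
  | nil => simp [PySem.List.insertBy]
  | cons y t => simp [PySem.List.insertBy, h y (List.mem_cons_self ..)]

theorem insertBy_cons_neg (bf : String → String → Bool) (c y : String) (t : List String)
    (h : bf c y = false) : PySem.List.insertBy bf c (y :: t) = y :: PySem.List.insertBy bf c t := by
  simp [PySem.List.insertBy, h]

-- inserting a preferred column into (preferred-part ++ non-preferred-part) lands at its rank slot
theorem insert_pref (Q : List String) :
    ∀ (c : String) (s ns : List String),
      Q.Pairwise (fun a b => krank a < krank b) → c ∈ Q → c ∉ s →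
      (∀ y ∈ ns, krank c < krank y) →
      PySem.List.insertBy bef c (Q.filter (fun p => decide (p ∈ s)) ++ ns)
        = Q.filter (fun p => decide (p ∈ s ∨ p = c)) ++ ns := by
  induction Q with
  | nil => intro c s ns _ hc; exact absurd hc (List.not_mem_nil)
  | cons q Q ih =>
    intro c s ns hpw hcQ hcs hns
    rw [List.pairwise_cons] at hpw
    by_cases hqc : q = c
    · subst hqc
      have hfQ : Q.filter (fun p => decide (p ∈ s ∨ p = q)) = Q.filter (fun p => decide (p ∈ s)) := by
        apply List.filter_congr; intro x hx
        have hxq : x ≠ q := by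
          intro h; exact absurd (hpw.1 x hx) (by rw [h]; exact lt_irrefl _)
        simp [hxq]
      have h1 : (q :: Q).filter (fun p => decide (p ∈ s)) = Q.filter (fun p => decide (p ∈ s)) := by
        rw [List.filter_cons]; simp [hcs]
      have h2 : (q :: Q).filter (fun p => decide (p ∈ s ∨ p = q))
          = q :: Q.filter (fun p => decide (p ∈ s)) := by
        rw [List.filter_cons, if_pos (by simp), hfQ]
      rw [h1, h2, List.cons_append]
      apply insertBy_front
      intro y hy
      rcases List.mem_append.mp hy with h | h
      · exact decide_eq_true (hpw.1 y (List.mem_filter.mp h).1)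
      · exact decide_eq_true (hns y h)
    · have hcQ' : c ∈ Q := by
        rcases List.mem_cons.mp hcQ with h | h
        · exact absurd h.symm hqc
        · exact h
      have hbef : bef c q = false := by
        have hlt : krank q < krank c := hpw.1 c hcQ'
        unfold bef; simp; omega
      by_cases hqs : q ∈ s
      · have hL : (q :: Q).filter (fun p => decide (p ∈ s))
            = q :: Q.filter (fun p => decide (p ∈ s)) := by
          rw [List.filter_cons]; simp [hqs]
        have hR : (q :: Q).filter (fun p => decide (p ∈ s ∨ p = c))
            = q :: Q.filter (fun p => decide (p ∈ s ∨ p = c)) := by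
          rw [List.filter_cons]; simp [hqs]
        rw [hL, hR, List.cons_append, List.cons_append, insertBy_cons_neg _ _ _ _ hbef,
          ih c s ns hpw.2 hcQ' hcs hns]
      · have hL : (q :: Q).filter (fun p => decide (p ∈ s))
            = Q.filter (fun p => decide (p ∈ s)) := by
          rw [List.filter_cons]; simp [hqs]
        have hR : (q :: Q).filter (fun p => decide (p ∈ s ∨ p = c))
            = Q.filter (fun p => decide (p ∈ s ∨ p = c)) := by
          rw [List.filter_cons]; simp [hqs, hqc]
        rw [hL, hR, ih c s ns hpw.2 hcQ' hcs hns]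

-- invariant of the insertion-sort fold: preferred columns present so far (in preferred order)
-- followed by the non-preferred ones in encounter order
theorem fold_inv (cs : List String) :
    ∀ (s : List String), (s ++ cs).Nodup →
      cs.foldl (fun acc x => PySem.List.insertBy bef x acc)
        (pvPreferredColumns.filter (fun p => decide (p ∈ s))
          ++ s.filter (fun x => !pvPreferredColumns.contains x))
      = pvPreferredColumns.filter (fun p => decide (p ∈ s ++ cs))
          ++ (s ++ cs).filter (fun x => !pvPreferredColumns.contains x) := by
  induction cs with
  | nil => intro s _; simp
  | cons c cs ih =>
    intro s hnd
    have hcs : c ∉ s := by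
      intro hmem
      exact (List.nodup_append.mp hnd).2.2 c hmem c (List.mem_cons_self ..) rfl
    simp only [List.foldl_cons]
    have hstep : PySem.List.insertBy bef c
        (pvPreferredColumns.filter (fun p => decide (p ∈ s))
          ++ s.filter (fun x => !pvPreferredColumns.contains x))
        = pvPreferredColumns.filter (fun p => decide (p ∈ s ++ [c]))
          ++ (s ++ [c]).filter (fun x => !pvPreferredColumns.contains x) := by
      by_cases hc : c ∈ pvPreferredColumns
      · rw [insert_pref pvPreferredColumns c s _ krank_pairwise hc hcs ?hns]
        · have h1 : pvPreferredColumns.filter (fun p => decide (p ∈ s ∨ p = c))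
              = pvPreferredColumns.filter (fun p => decide (p ∈ s ++ [c])) := by
            apply List.filter_congr; intro x _; simp [List.mem_append]
          have h2 : (s ++ [c]).filter (fun x => !pvPreferredColumns.contains x)
              = s.filter (fun x => !pvPreferredColumns.contains x) := by
            rw [List.filter_append]; simp [List.contains_eq_mem, hc]
          rw [h1, h2]
        case hns =>
          intro y hy
          have hyP : y ∉ pvPreferredColumns := by
            have := (List.mem_filter.mp hy).2
            simpa [List.contains_eq_mem] using this
          rw [krank_not_mem hyP]; exact krank_lt hc
      · rw [PySem.List.insertBy_of_forall_not_before]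
        · have h1 : pvPreferredColumns.filter (fun p => decide (p ∈ s ++ [c]))
              = pvPreferredColumns.filter (fun p => decide (p ∈ s)) := by
            apply List.filter_congr; intro x hx
            have hxc : x ≠ c := fun h => hc (h ▸ hx)
            simp [List.mem_append, hxc]
          have h2 : (s ++ [c]).filter (fun x => !pvPreferredColumns.contains x)
              = s.filter (fun x => !pvPreferredColumns.contains x) ++ [c] := by
            rw [List.filter_append]; simp [List.contains_eq_mem, hc]
          rw [h1, h2, List.append_assoc]
        · intro y hy
          have hyle : krank y ≤ (pvPreferredColumns.length : Int) := krank_le y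
          have hck : krank c = (pvPreferredColumns.length : Int) := krank_not_mem hc
          unfold bef; simp; omega
    rw [hstep]
    have hnd' : ((s ++ [c]) ++ cs).Nodup := by
      rw [List.append_assoc]; simpa using hnd
    have := ih (s ++ [c]) hnd'
    simpa [List.append_assoc] using this

theorem sorted_eq (cs : List String) (h : cs.Nodup) :
    PySem.List.sorted cs krank
      = pvPreferredColumns.filter (fun p => decide (p ∈ cs))
          ++ cs.filter (fun x => !pvPreferredColumns.contains x) := by
  rw [PySem.List.sorted_eq_foldl_insertBy]
  have h0 := fold_inv cs [] (by simpa using h)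
  simp only [show (fun a b => decide (krank a < krank b)) = bef from rfl]
  simpa using h0

-- A's second loop, started from ordered0 ++ b, splits off ordered0
theorem foldl_split (l : List String) :
    ∀ (o b : List String),
      l.foldl (fun acc c => if acc.contains c then acc else acc ++ [c]) (o ++ b)
        = o ++ l.foldl (fun acc c => if o.contains c || acc.contains c then acc else acc ++ [c]) b := by
  induction l with
  | nil => intro o b; simp
  | cons c l ih =>
    intro o b
    simp only [List.foldl_cons, List.contains_append]
    by_cases h : (o.contains c || b.contains c) = true
    · rw [if_pos h, if_pos h]; exact ih o b
    · rw [if_neg h, if_neg h, List.append_assoc]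
      exact ih o (b ++ [c])

-- the non-preferred part of an ordered-dedup fold is A's guarded dedup fold
theorem dedup_filter (l : List String) :
    ∀ (a : List String),
      (l.foldl PySem.Set.add a).filter (fun x => !pvPreferredColumns.contains x)
        = l.foldl (fun b c => if pvPreferredColumns.contains c || b.contains c then b else b ++ [c])
            (a.filter (fun x => !pvPreferredColumns.contains x)) := by
  induction l with
  | nil => intro a; simp
  | cons c l ih =>
    intro a
    simp only [List.foldl_cons]
    rw [ih (PySem.Set.add a c)]
    congr 1
    rw [show PySem.Set.add a c = if a.contains c then a else a ++ [c] from rfl]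
    by_cases hP : c ∈ pvPreferredColumns
    · have hstart : (if a.contains c = true then a else a ++ [c]).filter
          (fun x => !pvPreferredColumns.contains x)
          = a.filter (fun x => !pvPreferredColumns.contains x) := by
        split
        · rfl
        · rw [List.filter_append]; simp [hP]
      rw [hstart, if_pos (show (pvPreferredColumns.contains c
          || (a.filter (fun x => !pvPreferredColumns.contains x)).contains c) = true by
        simp [List.contains_eq_mem, hP])]
    · have hmem : (a.filter (fun x => !pvPreferredColumns.contains x)).contains c = a.contains c := by
        simp [List.contains_eq_mem, List.mem_filter, hP]
      have hguard : (pvPreferredColumns.contains c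
          || (a.filter (fun x => !pvPreferredColumns.contains x)).contains c) = a.contains c := by
        rw [hmem]; simp [List.contains_eq_mem, hP]
      by_cases ha : a.contains c = true
      · rw [if_pos ha, if_pos (by rw [hguard]; exact ha)]
      · rw [if_neg ha, if_neg (by rw [hguard]; exact ha)]
        rw [List.filter_append]; simp [hP]

-- adding only preferred columns does not change the non-preferred part
theorem foldl_add_pref (l : List String) :
    ∀ (a : List String), (∀ x ∈ l, x ∈ pvPreferredColumns) →
      (l.foldl PySem.Set.add a).filter (fun x => !pvPreferredColumns.contains x)
        = a.filter (fun x => !pvPreferredColumns.contains x) := by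
  induction l with
  | nil => intro a _; rfl
  | cons c l ih =>
    intro a h
    simp only [List.foldl_cons]
    rw [ih (PySem.Set.add a c) (fun x hx => h x (List.mem_cons_of_mem _ hx)),
      show PySem.Set.add a c = if a.contains c then a else a ++ [c] from rfl]
    have hcP : c ∈ pvPreferredColumns := h c (List.mem_cons_self ..)
    split
    · rfl
    · rw [List.filter_append]; simp [hcP]

-- a dedup loop over elements already present is a no-op
theorem foldl_noop (l : List String) :
    ∀ (acc : List String), (∀ x ∈ l, acc.contains x = true) →
      l.foldl (fun acc c => if acc.contains c then acc else acc ++ [c]) acc = acc := by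
  induction l with
  | nil => intro acc _; rfl
  | cons c l ih =>
    intro acc h
    simp only [List.foldl_cons]
    rw [if_pos (h c (List.mem_cons_self ..))]
    exact ih acc (fun x hx => h x (List.mem_cons_of_mem _ hx))

theorem main_eq (d : List String) :
    ["itemUrl", "photoUrl", "locationDisplay", "categoryDisplay"].foldl
        (fun acc derived => if acc.contains derived then acc else acc ++ [derived])
        (d.foldl (fun acc col => if acc.contains col then acc else acc ++ [col])
          (pvPreferredColumns.filter (fun col =>
            d.contains col ||
              PySem.Set.contains
                (PySem.Set.ofList ["itemUrl", "photoUrl", "locationDisplay", "categoryDisplay"]) col)))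
      = PySem.List.sorted
          (PySem.List.dedup (d ++ ["itemUrl", "photoUrl", "locationDisplay", "categoryDisplay"]))
          (fun c => ((PySem.List.enumerate pvPreferredColumns 0).foldl
              (fun acc p => acc.insert p.2 p.1) PySem.Dict.empty).getD c
            (pvPreferredColumns.length : Int)) false := by
  have hkey : (fun c => ((PySem.List.enumerate pvPreferredColumns 0).foldl
      (fun acc p => acc.insert p.2 p.1) PySem.Dict.empty).getD c
      (pvPreferredColumns.length : Int)) = krank := funext rank_getD
  rw [hkey]
  have hDnd : PySem.Set.ofList ["itemUrl", "photoUrl", "locationDisplay", "categoryDisplay"]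
      = ["itemUrl", "photoUrl", "locationDisplay", "categoryDisplay"] := by
    apply PySem.Set.ofList_eq_self_of_nodup; decide
  have hndD : (PySem.List.dedup
      (d ++ ["itemUrl", "photoUrl", "locationDisplay", "categoryDisplay"])).Nodup :=
    PySem.List.nodup_dedup _
  rw [sorted_eq _ hndD]
  set ordered0 := pvPreferredColumns.filter (fun col =>
    d.contains col ||
      PySem.Set.contains
        (PySem.Set.ofList ["itemUrl", "photoUrl", "locationDisplay", "categoryDisplay"]) col)
    with hord
  -- split A's dedup-extend fold off ordered0
  have h7 := foldl_split d ordered0 []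
  rw [List.append_nil] at h7
  rw [h7]
  -- inside that fold, testing membership of ordered0 is testing membership of the preferred list
  have h8 : d.foldl (fun acc c => if ordered0.contains c || acc.contains c then acc else acc ++ [c]) []
      = d.foldl (fun acc c => if pvPreferredColumns.contains c || acc.contains c then acc
          else acc ++ [c]) [] := by
    apply PySem.List.foldl_congr_mem
    intro acc c hc
    have : ordered0.contains c = pvPreferredColumns.contains c := by
      rw [hord]
      simp [List.contains_eq_mem, List.mem_filter, hc]
    rw [this]
  rw [h8]
  -- A's trailing derived-columns loop is a no-op
  rw [foldl_noop]
  · -- the two halves coincide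
    congr 1
    · rw [hord]
      apply List.filter_congr
      intro p _
      by_cases h1 : p ∈ d <;>
        by_cases h2 : p ∈ (["itemUrl", "photoUrl", "locationDisplay", "categoryDisplay"] : List String) <;>
        simp [hDnd, List.contains_eq_mem, List.mem_append, h1, h2]
    · rw [PySem.List.dedup_eq_ofList, PySem.Set.ofList_eq_foldl, List.foldl_append,
        foldl_add_pref _ _ (by intro x hx; fin_cases hx <;> decide),
        dedup_filter d []]
      rfl
  · -- every derived column already sits in ordered0
    intro x hx
    have hxP : x ∈ pvPreferredColumns := by fin_cases hx <;> decide
    have hxo : x ∈ ordered0 := by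
      rw [hord]
      refine List.mem_filter.mpr ⟨hxP, ?_⟩
      simp only [hDnd, PySem.Set.contains_eq_listContains, List.contains_eq_mem]
      simp only [Bool.or_eq_true, decide_eq_true_eq]
      exact Or.inr hx
    simp [List.contains_eq_mem, List.mem_append, hxo]

-- ===== VERDICT (by name: the statement is the Claim_ definition above) =====
theorem csv_fieldnames_for_state_spec : Claim_equal_csv_fieldnames_for_state := by
  intro state _
  unfold Spec_csv_fieldnames_for_state
  simp only [csv_fieldnames_for_state, csv_fieldnames_for_state_alt]
  exact main_eq ((PySem.Dict.mk state).getD "assetFieldNames" [])
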